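-- pv_equiv track=rewrite | github.com/yelkhashab/VisionCubed-API | src/get_state.py | update_state_for_r_move
-- ===== SOURCE A (Python) =====
-- def rotate_face_clockwise(face):
--     """
--     Rotates a face of the cube 90 degrees clockwise.
--     """
--     return [face[6], face[3], face[0], face[7], face[4], face[1], face[8], face[5], face[2]]
--
-- def rotate_face_anticlockwise(face):
--     """
--     Rotates a face of the cube 90 degrees anticlockwise.
--     """
--     return [face[2], face[5], face[8], face[1], face[4], face[7], face[0], face[3], face[6]]
--
-- def update_state_for_r_move(state, rotation):
--     """
--     Updates the cube state for an R move.
--     """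
--     new_state = {face: stickers[:] for face, stickers in state.items()}
--
--     if rotation == 'CW':
--         new_state['R'] = rotate_face_clockwise(state['R'])
--         new_state['U'][2], new_state['U'][5], new_state['U'][8] = state['F'][2], state['F'][5], state['F'][8]
--         new_state['F'][2], new_state['F'][5], new_state['F'][8] = state['D'][2], state['D'][5], state['D'][8]
--         new_state['D'][2], new_state['D'][5], new_state['D'][8] = state['B'][6], state['B'][3], state['B'][0]
--         new_state['B'][6], new_state['B'][3], new_state['B'][0] = state['U'][2], state['U'][5], state['U'][8]
--     elif rotation == 'ACW':
--         new_state['R'] = rotate_face_anticlockwise(state['R'])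
--         new_state['U'][2], new_state['U'][5], new_state['U'][8] = state['B'][6], state['B'][3], state['B'][0]
--         new_state['B'][6], new_state['B'][3], new_state['B'][0] = state['D'][2], state['D'][5], state['D'][8]
--         new_state['D'][2], new_state['D'][5], new_state['D'][8] = state['F'][2], state['F'][5], state['F'][8]
--         new_state['F'][2], new_state['F'][5], new_state['F'][8] = state['U'][2], state['U'][5], state['U'][8]
--     return new_state
-- ===== SOURCE B (Python) =====
-- # R move as one dest-position -> source-position permutation table; ACW is the
-- # dict inversion of CW; the new state is rebuilt in a single pure comprehension.
-- _CW_SOURCE = [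
--     (('R', 0), ('R', 6)), (('R', 1), ('R', 3)), (('R', 2), ('R', 0)),
--     (('R', 3), ('R', 7)), (('R', 4), ('R', 4)), (('R', 5), ('R', 1)),
--     (('R', 6), ('R', 8)), (('R', 7), ('R', 5)), (('R', 8), ('R', 2)),
--     (('U', 2), ('F', 2)), (('U', 5), ('F', 5)), (('U', 8), ('F', 8)),
--     (('F', 2), ('D', 2)), (('F', 5), ('D', 5)), (('F', 8), ('D', 8)),
--     (('D', 2), ('B', 6)), (('D', 5), ('B', 3)), (('D', 8), ('B', 0)),
--     (('B', 6), ('U', 2)), (('B', 3), ('U', 5)), (('B', 0), ('U', 8)),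
-- ]
--
-- def update_state_for_r_move(state, rotation):
--     """
--     Updates the cube state for an R move.
--     """
--     if rotation == 'CW':
--         src = dict(_CW_SOURCE)
--     elif rotation == 'ACW':
--         src = {pos: dst for dst, pos in _CW_SOURCE}
--     else:
--         return {face: stickers[:] for face, stickers in state.items()}
--     return {face: [state[src[face, i][0]][src[face, i][1]] if (face, i) in src else v
--                    for i, v in enumerate(stickers)]
--             for face, stickers in state.items()}
-- ===== Notes on version B (the rewrite author's own statement) =====
-- stated objective: alternative
-- what changed: A mutates a copied dict with two branches of unrolled triple tuple-assignments plus per-direction face-rotation helpers; B instead encodes the whole move as one destination-to-source position-permutation dict (ACW obtained by inverting the CW dict) and rebuilds the state in a single pure dict/list comprehension with no mutation.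
-- intended difference: On CW/ACW inputs whose R face does not have exactly 9 stickers, A's rotate helper silently truncates the R face to its first 9 permuted stickers, while B preserves the face's length (extra stickers stay in place); keeping all stickers of the given face is the intended behaviour for a state-update function. — e.g. on update_state_for_r_move(([("U", ["u0","u1","u2","u3","u4","u5","u6","u7","u8"]), ("F", ["f0","f1","f2","f3","f4","f5","f6","f7","f8"]), ("D", […): A returns [("U", ["u0", "u1", "f2", "u3", "u4", "f5", "u6", "u7", "f8"]), ("F", ["f0", "f1", "d2", "f3", "f4", "d5", "f6", "f7", …, B returns [("U", ["u0", "u1", "f2", "u3", "u4", "f5", "u6", "u7", "f8"]), ("F", ["f0", "f1", "d2", "f3", "f4", "d5", "f6", "f7", …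
import Mathlib
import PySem

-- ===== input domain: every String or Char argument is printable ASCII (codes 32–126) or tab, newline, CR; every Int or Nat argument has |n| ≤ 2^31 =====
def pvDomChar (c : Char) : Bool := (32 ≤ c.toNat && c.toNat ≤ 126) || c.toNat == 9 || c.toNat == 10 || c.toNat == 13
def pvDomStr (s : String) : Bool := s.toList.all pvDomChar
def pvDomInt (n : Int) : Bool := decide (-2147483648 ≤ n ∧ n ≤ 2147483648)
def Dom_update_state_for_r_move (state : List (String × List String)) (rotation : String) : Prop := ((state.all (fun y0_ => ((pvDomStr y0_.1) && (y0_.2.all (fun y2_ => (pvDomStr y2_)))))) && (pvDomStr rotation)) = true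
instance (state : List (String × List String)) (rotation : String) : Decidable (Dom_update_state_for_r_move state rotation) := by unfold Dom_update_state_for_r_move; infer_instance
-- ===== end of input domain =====

-- B replaces A's two branches of unrolled tuple assignments plus rotation helpers by one
-- destination→source position-permutation table (ACW = the dict inversion of CW) and a pure
-- comprehension rebuild of the state (objective: alternative / more declarative).
-- Where A RETURNS, the only difference is on R faces without exactly 9 stickers (D_ below).

-- ===== PORT A =====
-- face[i] with a literal nonnegative index: pyGetD is exact under Pre_ (IndexError excluded)
def pvRotCW (face : List String) : List String :=
  [PySem.List.pyGetD face 6 "", PySem.List.pyGetD face 3 "", PySem.List.pyGetD face 0 "",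
   PySem.List.pyGetD face 7 "", PySem.List.pyGetD face 4 "", PySem.List.pyGetD face 1 "",
   PySem.List.pyGetD face 8 "", PySem.List.pyGetD face 5 "", PySem.List.pyGetD face 2 ""]

def pvRotACW (face : List String) : List String :=
  [PySem.List.pyGetD face 2 "", PySem.List.pyGetD face 5 "", PySem.List.pyGetD face 8 "",
   PySem.List.pyGetD face 1 "", PySem.List.pyGetD face 4 "", PySem.List.pyGetD face 7 "",
   PySem.List.pyGetD face 0 "", PySem.List.pyGetD face 3 "", PySem.List.pyGetD face 6 ""]

-- the tuple assignment new_state[k][i1],new_state[k][i2],new_state[k][i3] = v1,v2,v3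
-- (RHS reads the unmodified `state`, so the three in-place writes are sequential sets)
def pvSet3 (l : List String) (i1 i2 i3 : Int) (v1 v2 v3 : String) : List String :=
  PySem.List.pySetD (PySem.List.pySetD (PySem.List.pySetD l i1 v1) i2 v2) i3 v3

-- state[k][i]; missing key / out-of-range index raise in Python and are excluded by Pre_
def pvRd (st : PySem.Dict String (List String)) (k : String) (i : Int) : String :=
  PySem.List.pyGetD (st.getD k []) i ""

def update_state_for_r_move (state : List (String × List String)) (rotation : String) : List (String × List String) :=
  let st := PySem.Dict.ofList state   -- the incoming dict
  let ns := st                        -- {face: stickers[:] for …} (copies are identities here)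
  if rotation == "CW" then
    let ns := ns.insert "R" (pvRotCW (st.getD "R" []))
    let ns := ns.insert "U" (pvSet3 (ns.getD "U" []) 2 5 8 (pvRd st "F" 2) (pvRd st "F" 5) (pvRd st "F" 8))
    let ns := ns.insert "F" (pvSet3 (ns.getD "F" []) 2 5 8 (pvRd st "D" 2) (pvRd st "D" 5) (pvRd st "D" 8))
    let ns := ns.insert "D" (pvSet3 (ns.getD "D" []) 2 5 8 (pvRd st "B" 6) (pvRd st "B" 3) (pvRd st "B" 0))
    let ns := ns.insert "B" (pvSet3 (ns.getD "B" []) 6 3 0 (pvRd st "U" 2) (pvRd st "U" 5) (pvRd st "U" 8))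
    ns.items
  else if rotation == "ACW" then
    let ns := ns.insert "R" (pvRotACW (st.getD "R" []))
    let ns := ns.insert "U" (pvSet3 (ns.getD "U" []) 2 5 8 (pvRd st "B" 6) (pvRd st "B" 3) (pvRd st "B" 0))
    let ns := ns.insert "B" (pvSet3 (ns.getD "B" []) 6 3 0 (pvRd st "D" 2) (pvRd st "D" 5) (pvRd st "D" 8))
    let ns := ns.insert "D" (pvSet3 (ns.getD "D" []) 2 5 8 (pvRd st "F" 2) (pvRd st "F" 5) (pvRd st "F" 8))
    let ns := ns.insert "F" (pvSet3 (ns.getD "F" []) 2 5 8 (pvRd st "U" 2) (pvRd st "U" 5) (pvRd st "U" 8))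
    ns.items
  else
    ns.items

-- ===== PORT B =====
-- _CW_SOURCE: destination (face, index) ← source (face, index) for a CW R move
def pvCWSource : List ((String × Int) × (String × Int)) :=
  [(("R", 0), ("R", 6)), (("R", 1), ("R", 3)), (("R", 2), ("R", 0)),
   (("R", 3), ("R", 7)), (("R", 4), ("R", 4)), (("R", 5), ("R", 1)),
   (("R", 6), ("R", 8)), (("R", 7), ("R", 5)), (("R", 8), ("R", 2)),
   (("U", 2), ("F", 2)), (("U", 5), ("F", 5)), (("U", 8), ("F", 8)),
   (("F", 2), ("D", 2)), (("F", 5), ("D", 5)), (("F", 8), ("D", 8)),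
   (("D", 2), ("B", 6)), (("D", 5), ("B", 3)), (("D", 8), ("B", 0)),
   (("B", 6), ("U", 2)), (("B", 3), ("U", 5)), (("B", 0), ("U", 8))]

-- the dict comprehension {face: [state[src[face,i][0]][src[face,i][1]] if (face,i) in src else v
--                                for i, v in enumerate(stickers)] for face, stickers in state.items()}
def pvRebuild (st : PySem.Dict String (List String))
    (src : PySem.Dict (String × Int) (String × Int)) : List (String × List String) :=
  st.items.map (fun p => (p.1,
    (PySem.List.enumerate p.2).map (fun q =>
      match src.get? (p.1, q.1) with
      | some s => PySem.List.pyGetD (st.getD s.1 []) s.2 ""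
      | none => q.2)))

def update_state_for_r_move_alt (state : List (String × List String)) (rotation : String) : List (String × List String) :=
  let st := PySem.Dict.ofList state
  if rotation == "CW" then
    pvRebuild st (PySem.Dict.ofList pvCWSource)                          -- src = dict(_CW_SOURCE)
  else if rotation == "ACW" then
    pvRebuild st (PySem.Dict.ofList (pvCWSource.map (fun p => (p.2, p.1))))  -- {pos: dst for dst, pos in _CW_SOURCE}
  else
    st.items.map (fun p => (p.1, p.2))                                   -- {face: stickers[:] for …}

-- ===== PRECONDITION & SPEC =====
-- Pre_ excludes exactly the inputs where A raises (KeyError: one of the five faces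
-- missing; IndexError: an accessed face shorter than its largest accessed index+1).
def Pre_update_state_for_r_move (state : List (String × List String)) (rotation : String) : Prop :=
  (rotation = "CW" ∨ rotation = "ACW") →
    ((PySem.Dict.ofList state).contains "R" = true ∧
     (PySem.Dict.ofList state).contains "U" = true ∧
     (PySem.Dict.ofList state).contains "F" = true ∧
     (PySem.Dict.ofList state).contains "D" = true ∧
     (PySem.Dict.ofList state).contains "B" = true ∧
     9 ≤ ((PySem.Dict.ofList state).getD "R" []).length ∧
     9 ≤ ((PySem.Dict.ofList state).getD "U" []).length ∧
     9 ≤ ((PySem.Dict.ofList state).getD "F" []).length ∧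
     9 ≤ ((PySem.Dict.ofList state).getD "D" []).length ∧
     7 ≤ ((PySem.Dict.ofList state).getD "B" []).length)

instance (state : List (String × List String)) (rotation : String) : Decidable (Pre_update_state_for_r_move state rotation) := by
  unfold Pre_update_state_for_r_move; infer_instance

def pvWitness_update_state_for_r_move : (List (String × List String)) × String :=
  ([("U", ["u0","u1","u2","u3","u4","u5","u6","u7","u8"]),
    ("D", ["d0","d1","d2","d3","d4","d5","d6","d7","d8"]),
    ("F", ["f0","f1","f2","f3","f4","f5","f6","f7","f8"]),
    ("B", ["b0","b1","b2","b3","b4","b5","b6","b7","b8"]),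
    ("R", ["r0","r1","r2","r3","r4","r5","r6","r7","r8"])], "CW")

-- On states whose R face does not have exactly 9 stickers (with rotation CW/ACW), A's
-- rotate helper silently truncates R to its first 9 permuted stickers while B preserves
-- the face's full length; B's length-preserving value is the intended one.
def D_update_state_for_r_move (state : List (String × List String)) (rotation : String) : Prop :=
  (rotation = "CW" ∨ rotation = "ACW") ∧ ¬ (((PySem.Dict.ofList state).getD "R" []).length = 9)

instance (state : List (String × List String)) (rotation : String) : Decidable (D_update_state_for_r_move state rotation) := by
  unfold D_update_state_for_r_move; infer_instance

def Spec_update_state_for_r_move (state : List (String × List String)) (rotation : String) (out : List (String × List String)) : Prop := ¬ D_update_state_for_r_move state rotation → out = update_state_for_r_move_alt state rotation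
instance (state : List (String × List String)) (rotation : String) (out : List (String × List String)) : Decidable (Spec_update_state_for_r_move state rotation out) := by unfold Spec_update_state_for_r_move; infer_instance

def pvDiffWitness_update_state_for_r_move : (List (String × List String)) × String :=
  ([("U", ["u0","u1","u2","u3","u4","u5","u6","u7","u8"]),
    ("F", ["f0","f1","f2","f3","f4","f5","f6","f7","f8"]),
    ("D", ["d0","d1","d2","d3","d4","d5","d6","d7","d8"]),
    ("B", ["b0","b1","b2","b3","b4","b5","b6"]),
    ("R", ["r0","r1","r2","r3","r4","r5","r6","r7","r8","r9"])], "CW")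

def pvDiffWitnessOut_update_state_for_r_move : (List (String × List String)) × (List (String × List String)) :=
  ([("U", ["u0", "u1", "f2", "u3", "u4", "f5", "u6", "u7", "f8"]),
    ("F", ["f0", "f1", "d2", "f3", "f4", "d5", "f6", "f7", "d8"]),
    ("D", ["d0", "d1", "b6", "d3", "d4", "b3", "d6", "d7", "b0"]),
    ("B", ["u8", "b1", "b2", "u5", "b4", "b5", "u2"]),
    ("R", ["r6", "r3", "r0", "r7", "r4", "r1", "r8", "r5", "r2"])],
   [("U", ["u0", "u1", "f2", "u3", "u4", "f5", "u6", "u7", "f8"]),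
    ("F", ["f0", "f1", "d2", "f3", "f4", "d5", "f6", "f7", "d8"]),
    ("D", ["d0", "d1", "b6", "d3", "d4", "b3", "d6", "d7", "b0"]),
    ("B", ["u8", "b1", "b2", "u5", "b4", "b5", "u2"]),
    ("R", ["r6", "r3", "r0", "r7", "r4", "r1", "r8", "r5", "r2", "r9"])])

-- ===== CLAIM (what is proved, stated in full; the proofs are below) =====
def Claim_unchanged_update_state_for_r_move : Prop := ∀ (state : List (String × List String)) (rotation : String), Dom_update_state_for_r_move state rotation → Pre_update_state_for_r_move state rotation → Spec_update_state_for_r_move state rotation (update_state_for_r_move state rotation)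
def Claim_changed_update_state_for_r_move : Prop := Dom_update_state_for_r_move (pvDiffWitness_update_state_for_r_move.1) (pvDiffWitness_update_state_for_r_move.2) ∧ Pre_update_state_for_r_move (pvDiffWitness_update_state_for_r_move.1) (pvDiffWitness_update_state_for_r_move.2) ∧ D_update_state_for_r_move (pvDiffWitness_update_state_for_r_move.1) (pvDiffWitness_update_state_for_r_move.2) ∧ update_state_for_r_move (pvDiffWitness_update_state_for_r_move.1) (pvDiffWitness_update_state_for_r_move.2) = pvDiffWitnessOut_update_state_for_r_move.1 ∧ update_state_for_r_move_alt (pvDiffWitness_update_state_for_r_move.1) (pvDiffWitness_update_state_for_r_move.2) = pvDiffWitnessOut_update_state_for_r_move.2 ∧ pvDiffWitnessOut_update_state_for_r_move.1 ≠ pvDiffWitnessOut_update_state_for_r_move.2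
def Claim_exact_update_state_for_r_move : Prop := ∀ (state : List (String × List String)) (rotation : String), Dom_update_state_for_r_move state rotation → Pre_update_state_for_r_move state rotation → D_update_state_for_r_move state rotation → update_state_for_r_move state rotation ≠ update_state_for_r_move_alt state rotation

-- ===== LEMMAS AND PROOFS =====

-- mapD d g: d with every value replaced by g of its key; lets the insert chains of A and
-- the comprehension of B be compared as a single key-to-value function.
def mapD (d : PySem.Dict String (List String)) (g : String → List String) : PySem.Dict String (List String) :=
  PySem.Dict.mk (d.items.map (fun p => (p.1, g p.1)))

theorem Mc (d : PySem.Dict String (List String)) (g : String → List String) (k : String) :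
    (mapD d g).contains k = d.contains k := by
  simp only [mapD, PySem.Dict.contains, List.any_map]
  congr 1

theorem M0 (d : PySem.Dict String (List String)) (hnd : d.keys.Nodup) :
    mapD d (fun x => d.getD x []) = d := by
  apply PySem.Dict.ext
  simp only [mapD]
  conv_rhs => rw [show d.items = d.items.map id by simp]
  apply List.map_congr_left
  intro p hp
  have : d.getD p.1 [] = p.2 := PySem.Dict.getD_of_mem_items d (by simpa using hp) hnd []
  simp [this]

theorem M2 (d : PySem.Dict String (List String)) (g : String → List String) (k : String) (dflt : List String)
    (h : (mapD d g).contains k = true) :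
    (mapD d g).getD k dflt = g k := by
  simp only [mapD, PySem.Dict.getD, PySem.Dict.get?, PySem.Dict.contains] at *
  rw [List.find?_map]
  cases hf : List.find? ((fun p => p.1 == k) ∘ fun p => (p.1, g p.1)) d.items with
  | none =>
    exfalso
    rw [List.any_map] at h
    obtain ⟨q, hq, hqk⟩ := List.any_eq_true.mp h
    have := List.find?_eq_none.mp hf q hq
    simp_all [Function.comp]
  | some q =>
    have hqk := List.find?_some hf
    simp only [Function.comp] at hqk
    have : q.1 = k := by simpa using hqk
    simp [this]

theorem M1 (d : PySem.Dict String (List String)) (g : String → List String) (k : String) (v : List String)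
    (h : (mapD d g).contains k = true) :
    (mapD d g).insert k v = mapD d (fun x => if x = k then v else g x) := by
  apply PySem.Dict.ext
  rw [PySem.Dict.items_insert_of_contains _ _ h]
  simp only [mapD, List.map_map]
  apply List.map_congr_left
  intro p _
  by_cases hp : p.1 = k <;> simp [Function.comp, hp]

theorem M1b (d : PySem.Dict String (List String)) (k : String) (v : List String)
    (hnd : d.keys.Nodup) (h : d.contains k = true) :
    d.insert k v = mapD d (fun x => if x = k then v else d.getD x []) := by
  conv_lhs => rw [← M0 d hnd]
  rw [M1]
  rw [Mc, h]

-- A's value function after its five inserts, per rotation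
def gAcw (st : PySem.Dict String (List String)) : String → List String := fun x =>
  if x = "B" then pvSet3 (st.getD "B" []) 6 3 0 (pvRd st "U" 2) (pvRd st "U" 5) (pvRd st "U" 8)
  else if x = "D" then pvSet3 (st.getD "D" []) 2 5 8 (pvRd st "B" 6) (pvRd st "B" 3) (pvRd st "B" 0)
  else if x = "F" then pvSet3 (st.getD "F" []) 2 5 8 (pvRd st "D" 2) (pvRd st "D" 5) (pvRd st "D" 8)
  else if x = "U" then pvSet3 (st.getD "U" []) 2 5 8 (pvRd st "F" 2) (pvRd st "F" 5) (pvRd st "F" 8)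
  else if x = "R" then pvRotCW (st.getD "R" [])
  else st.getD x []

def gAacw (st : PySem.Dict String (List String)) : String → List String := fun x =>
  if x = "F" then pvSet3 (st.getD "F" []) 2 5 8 (pvRd st "U" 2) (pvRd st "U" 5) (pvRd st "U" 8)
  else if x = "D" then pvSet3 (st.getD "D" []) 2 5 8 (pvRd st "F" 2) (pvRd st "F" 5) (pvRd st "F" 8)
  else if x = "B" then pvSet3 (st.getD "B" []) 6 3 0 (pvRd st "D" 2) (pvRd st "D" 5) (pvRd st "D" 8)
  else if x = "U" then pvSet3 (st.getD "U" []) 2 5 8 (pvRd st "B" 6) (pvRd st "B" 3) (pvRd st "B" 0)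
  else if x = "R" then pvRotACW (st.getD "R" [])
  else st.getD x []

theorem A_cw (state : List (String × List String))
    (hR : (PySem.Dict.ofList state).contains "R" = true)
    (hU : (PySem.Dict.ofList state).contains "U" = true)
    (hF : (PySem.Dict.ofList state).contains "F" = true)
    (hD : (PySem.Dict.ofList state).contains "D" = true)
    (hB : (PySem.Dict.ofList state).contains "B" = true) :
    update_state_for_r_move state "CW"
      = (mapD (PySem.Dict.ofList state) (gAcw (PySem.Dict.ofList state))).items := by
  have hnd : (PySem.Dict.ofList state).keys.Nodup := PySem.Dict.nodup_keys_ofList state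
  simp only [update_state_for_r_move, beq_self_eq_true, if_true]
  rw [M1b _ _ _ hnd hR]
  simp only [M1, M2, Mc, hU, hF, hD, hB]
  rfl

theorem A_acw (state : List (String × List String))
    (hR : (PySem.Dict.ofList state).contains "R" = true)
    (hU : (PySem.Dict.ofList state).contains "U" = true)
    (hF : (PySem.Dict.ofList state).contains "F" = true)
    (hD : (PySem.Dict.ofList state).contains "D" = true)
    (hB : (PySem.Dict.ofList state).contains "B" = true) :
    update_state_for_r_move state "ACW"
      = (mapD (PySem.Dict.ofList state) (gAacw (PySem.Dict.ofList state))).items := by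
  have hnd : (PySem.Dict.ofList state).keys.Nodup := PySem.Dict.nodup_keys_ofList state
  simp only [update_state_for_r_move, beq_self_eq_true, if_true,
    show (("ACW" == "CW") = true) = False from by decide, if_false]
  rw [M1b _ _ _ hnd hR]
  simp only [M1, M2, Mc, hU, hF, hD, hB]
  rfl

-- B's comprehension as mapD: each items entry (k, v) has v = st.getD k [] under Nodup keys
theorem rebuild_eq (st : PySem.Dict String (List String))
    (src : PySem.Dict (String × Int) (String × Int)) (hnd : st.keys.Nodup) :
    pvRebuild st src = (mapD st (fun k =>
      (PySem.List.enumerate (st.getD k [])).map (fun q =>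
        match src.get? (k, q.1) with
        | some s => PySem.List.pyGetD (st.getD s.1 []) s.2 ""
        | none => q.2))).items := by
  simp only [pvRebuild, mapD]
  apply List.map_congr_left
  intro p hp
  have : st.getD p.1 [] = p.2 := PySem.Dict.getD_of_mem_items st (by simpa using hp) hnd []
  simp [this]

-- one 4-cycle face (three moved stickers) of B's comprehension = A's three in-place sets
theorem face3 (rd : String × Int → String) (l : List String)
    (src : PySem.Dict (String × Int) (String × Int)) (k : String)
    (i1 i2 i3 : Nat) (s1 s2 s3 : String × Int)
    (h12 : i1 ≠ i2) (h13 : i1 ≠ i3) (h23 : i2 ≠ i3)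
    (h1 : src.get? (k, (i1:Int)) = some s1)
    (h2 : src.get? (k, (i2:Int)) = some s2)
    (h3 : src.get? (k, (i3:Int)) = some s3)
    (h0 : ∀ j : Nat, j ≠ i1 → j ≠ i2 → j ≠ i3 → src.get? (k, (j:Int)) = none) :
    (PySem.List.enumerate l).map (fun q =>
      match src.get? (k, q.1) with
      | some s => rd s
      | none => q.2)
    = pvSet3 l (i1:Int) (i2:Int) (i3:Int) (rd s1) (rd s2) (rd s3) := by
  apply List.ext_getElem
  · simp [pvSet3, PySem.List.length_enumerate]
  intro j hj hj2
  simp only [List.getElem_map, PySem.List.getElem_enumerate, zero_add]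
  simp only [pvSet3, PySem.List.pySetD_natCast]
  rw [List.getElem_set, List.getElem_set, List.getElem_set]
  by_cases e1 : j = i1
  · subst e1; rw [h1]; simp [Ne.symm h12, Ne.symm h13]
  · by_cases e2 : j = i2
    · subst e2; rw [h2]; simp [Ne.symm h23]
    · by_cases e3 : j = i3
      · subst e3; rw [h3]; simp
      · rw [h0 j e1 e2 e3]
        simp [Ne.symm e1, Ne.symm e2, Ne.symm e3]

-- the R face: all nine positions are in the table, the list has exactly nine stickers
theorem faceR (rd : String × Int → String) (l : List String)
    (src : PySem.Dict (String × Int) (String × Int)) (k : String)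
    (hlen : l.length = 9) (s0 s1 s2 s3 s4 s5 s6 s7 s8 : String × Int)
    (g0 : src.get? (k, (0:Int)) = some s0) (g1 : src.get? (k, (1:Int)) = some s1)
    (g2 : src.get? (k, (2:Int)) = some s2) (g3 : src.get? (k, (3:Int)) = some s3)
    (g4 : src.get? (k, (4:Int)) = some s4) (g5 : src.get? (k, (5:Int)) = some s5)
    (g6 : src.get? (k, (6:Int)) = some s6) (g7 : src.get? (k, (7:Int)) = some s7)
    (g8 : src.get? (k, (8:Int)) = some s8) :
    (PySem.List.enumerate l).map (fun q =>
      match src.get? (k, q.1) with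
      | some s => rd s
      | none => q.2)
    = [rd s0, rd s1, rd s2, rd s3, rd s4, rd s5, rd s6, rd s7, rd s8] := by
  apply List.ext_getElem
  · simp [PySem.List.length_enumerate, hlen]
  intro j hj hj2
  simp only [List.getElem_map, PySem.List.getElem_enumerate, zero_add]
  simp only [List.length_map, PySem.List.length_enumerate, hlen] at hj
  interval_cases j <;>
    simp only [Nat.cast_ofNat, Nat.cast_zero, Nat.cast_one, g0, g1, g2, g3, g4, g5, g6, g7, g8] <;> rfl

-- a face no position of which is in the table keeps its stickers
theorem faceOther (rd : String × Int → String) (l : List String)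
    (src : PySem.Dict (String × Int) (String × Int)) (k : String)
    (h0 : ∀ j : Nat, src.get? (k, (j:Int)) = none) :
    (PySem.List.enumerate l).map (fun q =>
      match src.get? (k, q.1) with
      | some s => rd s
      | none => q.2) = l := by
  have heq : (PySem.List.enumerate l).map (fun q =>
      match src.get? (k, q.1) with
      | some s => rd s
      | none => q.2) = (PySem.List.enumerate l).map (fun q => q.2) := by
    apply List.map_congr_left
    intro q hq
    obtain ⟨j, hjl, rfl⟩ := (PySem.List.mem_enumerate_iff _ _ _).mp hq
    simp [h0 j]
  rw [heq, PySem.List.map_snd_enumerate]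

-- get? characterisations of the two literal source tables
theorem ofList_cw : PySem.Dict.ofList pvCWSource = PySem.Dict.mk pvCWSource := by decide
def pvACWSource : List ((String × Int) × (String × Int)) := pvCWSource.map (fun p => (p.2, p.1))
theorem ofList_acw : PySem.Dict.ofList (pvCWSource.map (fun p => (p.2, p.1))) = PySem.Dict.mk pvACWSource := by decide

theorem cw_258_none (k : String) (hk : k = "U" ∨ k = "F" ∨ k = "D") (j : Nat)
    (h2 : j ≠ 2) (h5 : j ≠ 5) (h8 : j ≠ 8) :
    (PySem.Dict.mk pvCWSource).get? (k, (j:Int)) = none := by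
  have h2' : (j:Int) ≠ 2 := by exact_mod_cast h2
  have h5' : (j:Int) ≠ 5 := by exact_mod_cast h5
  have h8' : (j:Int) ≠ 8 := by exact_mod_cast h8
  rcases hk with rfl | rfl | rfl <;>
    simp [pvCWSource, Prod.ext_iff, Ne.symm h2', Ne.symm h5', Ne.symm h8', PySem.Dict.get?]

theorem acw_258_none (k : String) (hk : k = "U" ∨ k = "F" ∨ k = "D") (j : Nat)
    (h2 : j ≠ 2) (h5 : j ≠ 5) (h8 : j ≠ 8) :
    (PySem.Dict.mk pvACWSource).get? (k, (j:Int)) = none := by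
  have h2' : (j:Int) ≠ 2 := by exact_mod_cast h2
  have h5' : (j:Int) ≠ 5 := by exact_mod_cast h5
  have h8' : (j:Int) ≠ 8 := by exact_mod_cast h8
  rcases hk with rfl | rfl | rfl <;>
    simp [pvACWSource, pvCWSource, Prod.ext_iff, Ne.symm h2', Ne.symm h5', Ne.symm h8', PySem.Dict.get?]

theorem cw_B_none (j : Nat) (h0 : j ≠ 0) (h3 : j ≠ 3) (h6 : j ≠ 6) :
    (PySem.Dict.mk pvCWSource).get? ("B", (j:Int)) = none := by
  have h0' : (j:Int) ≠ 0 := by exact_mod_cast h0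
  have h3' : (j:Int) ≠ 3 := by exact_mod_cast h3
  have h6' : (j:Int) ≠ 6 := by exact_mod_cast h6
  simp [pvCWSource, Prod.ext_iff, Ne.symm h0', Ne.symm h3', Ne.symm h6', PySem.Dict.get?]

theorem acw_B_none (j : Nat) (h0 : j ≠ 0) (h3 : j ≠ 3) (h6 : j ≠ 6) :
    (PySem.Dict.mk pvACWSource).get? ("B", (j:Int)) = none := by
  have h0' : (j:Int) ≠ 0 := by exact_mod_cast h0
  have h3' : (j:Int) ≠ 3 := by exact_mod_cast h3
  have h6' : (j:Int) ≠ 6 := by exact_mod_cast h6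
  simp [pvACWSource, pvCWSource, Prod.ext_iff, Ne.symm h0', Ne.symm h3', Ne.symm h6', PySem.Dict.get?]

theorem cw_other_none (k : String) (hR : k ≠ "R") (hU : k ≠ "U") (hF : k ≠ "F")
    (hD : k ≠ "D") (hB : k ≠ "B") (j : Nat) :
    (PySem.Dict.mk pvCWSource).get? (k, (j:Int)) = none := by
  rw [PySem.Dict.get?_eq_none_iff_contains]
  simp [pvCWSource, PySem.Dict.contains, Prod.ext_iff, Ne.symm hR, Ne.symm hU, Ne.symm hF, Ne.symm hD, Ne.symm hB]

theorem acw_other_none (k : String) (hR : k ≠ "R") (hU : k ≠ "U") (hF : k ≠ "F")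
    (hD : k ≠ "D") (hB : k ≠ "B") (j : Nat) :
    (PySem.Dict.mk pvACWSource).get? (k, (j:Int)) = none := by
  rw [PySem.Dict.get?_eq_none_iff_contains]
  simp [pvACWSource, pvCWSource, PySem.Dict.contains, Prod.ext_iff, Ne.symm hR, Ne.symm hU, Ne.symm hF, Ne.symm hD, Ne.symm hB]

theorem cw_case (state : List (String × List String))
    (hR : (PySem.Dict.ofList state).contains "R" = true)
    (hU : (PySem.Dict.ofList state).contains "U" = true)
    (hF : (PySem.Dict.ofList state).contains "F" = true)
    (hD : (PySem.Dict.ofList state).contains "D" = true)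
    (hB : (PySem.Dict.ofList state).contains "B" = true)
    (hlen : ((PySem.Dict.ofList state).getD "R" []).length = 9) :
    update_state_for_r_move state "CW" = update_state_for_r_move_alt state "CW" := by
  have hnd : (PySem.Dict.ofList state).keys.Nodup := PySem.Dict.nodup_keys_ofList state
  rw [A_cw state hR hU hF hD hB]
  simp only [update_state_for_r_move_alt, beq_self_eq_true, if_true]
  rw [rebuild_eq _ _ hnd, ofList_cw]
  apply congrArg
  apply congrArg
  funext x
  set st := PySem.Dict.ofList state with hst
  by_cases xB : x = "B"
  · subst xB
    have := face3 (fun s => PySem.List.pyGetD (st.getD s.1 []) s.2 "") (st.getD "B" [])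
      (PySem.Dict.mk pvCWSource) "B" 6 3 0 ("U", 2) ("U", 5) ("U", 8)
      (by decide) (by decide) (by decide) (by decide) (by decide) (by decide)
      (fun j a b c => cw_B_none j c b a)
    simpa [gAcw, pvRd] using this.symm
  · by_cases xD : x = "D"
    · subst xD
      have := face3 (fun s => PySem.List.pyGetD (st.getD s.1 []) s.2 "") (st.getD "D" [])
        (PySem.Dict.mk pvCWSource) "D" 2 5 8 ("B", 6) ("B", 3) ("B", 0)
        (by decide) (by decide) (by decide) (by decide) (by decide) (by decide)
        (cw_258_none "D" (Or.inr (Or.inr rfl)))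
      simpa [gAcw, pvRd] using this.symm
    · by_cases xF : x = "F"
      · subst xF
        have := face3 (fun s => PySem.List.pyGetD (st.getD s.1 []) s.2 "") (st.getD "F" [])
          (PySem.Dict.mk pvCWSource) "F" 2 5 8 ("D", 2) ("D", 5) ("D", 8)
          (by decide) (by decide) (by decide) (by decide) (by decide) (by decide)
          (cw_258_none "F" (Or.inr (Or.inl rfl)))
        simpa [gAcw, pvRd] using this.symm
      · by_cases xU : x = "U"
        · subst xU
          have := face3 (fun s => PySem.List.pyGetD (st.getD s.1 []) s.2 "") (st.getD "U" [])
            (PySem.Dict.mk pvCWSource) "U" 2 5 8 ("F", 2) ("F", 5) ("F", 8)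
            (by decide) (by decide) (by decide) (by decide) (by decide) (by decide)
            (cw_258_none "U" (Or.inl rfl))
          simpa [gAcw, pvRd] using this.symm
        · by_cases xR : x = "R"
          · subst xR
            have := faceR (fun s => PySem.List.pyGetD (st.getD s.1 []) s.2 "") (st.getD "R" [])
              (PySem.Dict.mk pvCWSource) "R" hlen
              ("R", 6) ("R", 3) ("R", 0) ("R", 7) ("R", 4) ("R", 1) ("R", 8) ("R", 5) ("R", 2)
              (by decide) (by decide) (by decide) (by decide) (by decide)
              (by decide) (by decide) (by decide) (by decide)
            simp [gAcw, pvRotCW, this]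
          · have := faceOther (fun s => PySem.List.pyGetD (st.getD s.1 []) s.2 "") (st.getD x [])
              (PySem.Dict.mk pvCWSource) x (cw_other_none x xR xU xF xD xB)
            simp [gAcw, xB, xD, xF, xU, xR, this]

theorem acw_case (state : List (String × List String))
    (hR : (PySem.Dict.ofList state).contains "R" = true)
    (hU : (PySem.Dict.ofList state).contains "U" = true)
    (hF : (PySem.Dict.ofList state).contains "F" = true)
    (hD : (PySem.Dict.ofList state).contains "D" = true)
    (hB : (PySem.Dict.ofList state).contains "B" = true)
    (hlen : ((PySem.Dict.ofList state).getD "R" []).length = 9) :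
    update_state_for_r_move state "ACW" = update_state_for_r_move_alt state "ACW" := by
  have hnd : (PySem.Dict.ofList state).keys.Nodup := PySem.Dict.nodup_keys_ofList state
  rw [A_acw state hR hU hF hD hB]
  simp only [update_state_for_r_move_alt, beq_self_eq_true, if_true,
    show (("ACW" == "CW") = true) = False from by decide, if_false]
  rw [rebuild_eq _ _ hnd, ofList_acw]
  apply congrArg
  apply congrArg
  funext x
  set st := PySem.Dict.ofList state with hst
  by_cases xF : x = "F"
  · subst xF
    have := face3 (fun s => PySem.List.pyGetD (st.getD s.1 []) s.2 "") (st.getD "F" [])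
      (PySem.Dict.mk pvACWSource) "F" 2 5 8 ("U", 2) ("U", 5) ("U", 8)
      (by decide) (by decide) (by decide) (by decide) (by decide) (by decide)
      (acw_258_none "F" (Or.inr (Or.inl rfl)))
    simpa [gAacw, pvRd] using this.symm
  · by_cases xD : x = "D"
    · subst xD
      have := face3 (fun s => PySem.List.pyGetD (st.getD s.1 []) s.2 "") (st.getD "D" [])
        (PySem.Dict.mk pvACWSource) "D" 2 5 8 ("F", 2) ("F", 5) ("F", 8)
        (by decide) (by decide) (by decide) (by decide) (by decide) (by decide)
        (acw_258_none "D" (Or.inr (Or.inr rfl)))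
      simpa [gAacw, pvRd] using this.symm
    · by_cases xB : x = "B"
      · subst xB
        have := face3 (fun s => PySem.List.pyGetD (st.getD s.1 []) s.2 "") (st.getD "B" [])
          (PySem.Dict.mk pvACWSource) "B" 6 3 0 ("D", 2) ("D", 5) ("D", 8)
          (by decide) (by decide) (by decide) (by decide) (by decide) (by decide)
          (fun j a b c => acw_B_none j c b a)
        simpa [gAacw, pvRd] using this.symm
      · by_cases xU : x = "U"
        · subst xU
          have := face3 (fun s => PySem.List.pyGetD (st.getD s.1 []) s.2 "") (st.getD "U" [])
            (PySem.Dict.mk pvACWSource) "U" 2 5 8 ("B", 6) ("B", 3) ("B", 0)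
            (by decide) (by decide) (by decide) (by decide) (by decide) (by decide)
            (acw_258_none "U" (Or.inl rfl))
          simpa [gAacw, pvRd] using this.symm
        · by_cases xR : x = "R"
          · subst xR
            have := faceR (fun s => PySem.List.pyGetD (st.getD s.1 []) s.2 "") (st.getD "R" [])
              (PySem.Dict.mk pvACWSource) "R" hlen
              ("R", 2) ("R", 5) ("R", 8) ("R", 1) ("R", 4) ("R", 7) ("R", 0) ("R", 3) ("R", 6)
              (by decide) (by decide) (by decide) (by decide) (by decide)
              (by decide) (by decide) (by decide) (by decide)
            simp [gAacw, pvRotACW, this]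
          · have := faceOther (fun s => PySem.List.pyGetD (st.getD s.1 []) s.2 "") (st.getD x [])
              (PySem.Dict.mk pvACWSource) x
              (acw_other_none x xR xU xF xD xB)
            simp [gAacw, xB, xD, xF, xU, xR, this]

-- the R entry of B's rebuilt state keeps the face's length; A's is always 9 long
theorem tight_core (state : List (String × List String)) (rotation : String)
    (hR : (PySem.Dict.ofList state).contains "R" = true)
    (hrot : rotation = "CW" ∨ rotation = "ACW")
    (hlen : ¬ ((PySem.Dict.ofList state).getD "R" []).length = 9)
    (hU : (PySem.Dict.ofList state).contains "U" = true)
    (hF : (PySem.Dict.ofList state).contains "F" = true)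
    (hD : (PySem.Dict.ofList state).contains "D" = true)
    (hB : (PySem.Dict.ofList state).contains "B" = true) :
    update_state_for_r_move state rotation ≠ update_state_for_r_move_alt state rotation := by
  intro h
  have hnd : (PySem.Dict.ofList state).keys.Nodup := PySem.Dict.nodup_keys_ofList state
  have hmem : ∃ p ∈ (PySem.Dict.ofList state).items, p.1 = "R" := by
    have := (PySem.Dict.contains_iff_mem_keys (PySem.Dict.ofList state) "R").mp hR
    simpa [PySem.Dict.keys, List.mem_map, eq_comm] using this
  obtain ⟨p, hp, hp1⟩ := hmem
  rcases hrot with rfl | rfl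
  · rw [A_cw state hR hU hF hD hB] at h
    simp only [update_state_for_r_move_alt, beq_self_eq_true, if_true] at h
    rw [rebuild_eq _ _ hnd, ofList_cw] at h
    simp only [mapD] at h
    have hpt := List.map_inj_left.mp h p hp
    rw [hp1] at hpt
    have hval := congrArg Prod.snd hpt
    dsimp only at hval
    have hlenA : (gAcw (PySem.Dict.ofList state) "R").length = 9 := by
      simp [gAcw, pvRotCW]
    rw [hval] at hlenA
    simp only [List.length_map, PySem.List.length_enumerate] at hlenA
    exact hlen hlenA
  · rw [A_acw state hR hU hF hD hB] at h
    simp only [update_state_for_r_move_alt, beq_self_eq_true, if_true,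
      show (("ACW" == "CW") = true) = False from by decide, if_false] at h
    rw [rebuild_eq _ _ hnd, ofList_acw] at h
    simp only [mapD] at h
    have hpt := List.map_inj_left.mp h p hp
    rw [hp1] at hpt
    have hval := congrArg Prod.snd hpt
    dsimp only at hval
    have hlenA : (gAacw (PySem.Dict.ofList state) "R").length = 9 := by
      simp [gAacw, pvRotACW]
    rw [hval] at hlenA
    simp only [List.length_map, PySem.List.length_enumerate] at hlenA
    exact hlen hlenA

-- ===== VERDICT (by name: the statement is the Claim_ definition above) =====
theorem update_state_for_r_move_spec : Claim_unchanged_update_state_for_r_move := by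
  intro state rotation _hdom hpre
  unfold Spec_update_state_for_r_move
  intro hnd
  by_cases hcw : rotation = "CW"
  · subst hcw
    obtain ⟨hR, hU, hF, hD, hB, -⟩ := hpre (Or.inl rfl)
    have hlen : ((PySem.Dict.ofList state).getD "R" []).length = 9 := by
      unfold D_update_state_for_r_move at hnd
      by_contra h
      exact hnd ⟨Or.inl rfl, h⟩
    exact cw_case state hR hU hF hD hB hlen
  · by_cases hacw : rotation = "ACW"
    · subst hacw
      obtain ⟨hR, hU, hF, hD, hB, -⟩ := hpre (Or.inr rfl)
      have hlen : ((PySem.Dict.ofList state).getD "R" []).length = 9 := by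
        unfold D_update_state_for_r_move at hnd
        by_contra h
        exact hnd ⟨Or.inr rfl, h⟩
      exact acw_case state hR hU hF hD hB hlen
    · simp [update_state_for_r_move, update_state_for_r_move_alt, hcw, hacw]

theorem update_state_for_r_move_changed : Claim_changed_update_state_for_r_move := by
  unfold Claim_changed_update_state_for_r_move; decide

theorem update_state_for_r_move_tight : Claim_exact_update_state_for_r_move := by
  intro state rotation _hdom hpre hd
  obtain ⟨hrot, hlen⟩ := hd
  obtain ⟨hR, hU, hF, hD, hB, -⟩ := hpre hrot
  exact tight_core state rotation hR hrot hlen hU hF hD hB
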